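-- pv_equiv track=rewrite | github.com/linhdvu14/cp-sols | sols/CodeForces/1810_d12_codeton/B_Candies.py | solve
-- ===== SOURCE A (Python) =====
-- def solve(N):
--     if N % 2 == 0: return -1, []
--
--     res = []
--     while N > 1:
--         if (N + 1) // 2 % 2:
--             res.append(1)
--             N = (N + 1) // 2
--         else:
--             res.append(2)
--             N = (N - 1) // 2
--
--     return len(res), res[::-1]
-- ===== SOURCE B (Python) =====
-- def solve(N):
--     if N % 2 == 0:
--         return -1, []
--     if N <= 1:
--         return 0, []
--     k = N.bit_length() - 1
--     m = (N - 1) // 2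
--     return k, [2 if (m >> (k - 1 - i)) & 1 else 1 for i in range(k)]
-- ===== Notes on version B (the rewrite author's own statement) =====
-- stated objective: alternative
-- what changed: B replaces A's branch-driven halving loop (append 1 or 2, halve N, then reverse) with a closed form: k = N.bit_length()-1 and the digits read off the bits of m=(N-1)//2 from most-significant to least-significant (2 for a 1-bit, 1 for a 0-bit).
import Mathlib
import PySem

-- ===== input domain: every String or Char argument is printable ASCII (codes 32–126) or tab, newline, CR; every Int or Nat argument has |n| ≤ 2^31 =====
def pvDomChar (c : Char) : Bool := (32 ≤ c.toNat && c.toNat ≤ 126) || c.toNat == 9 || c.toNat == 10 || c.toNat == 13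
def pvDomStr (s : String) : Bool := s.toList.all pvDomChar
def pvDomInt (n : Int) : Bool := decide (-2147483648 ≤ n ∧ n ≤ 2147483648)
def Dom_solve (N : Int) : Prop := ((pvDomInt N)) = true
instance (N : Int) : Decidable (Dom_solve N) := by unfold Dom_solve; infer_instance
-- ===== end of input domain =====

-- B derives the answer from the bit pattern of (N-1)//2 read MSB-first (closed-form index map, no reversal) instead of A's halving loop; objective: alternative.

-- ===== PORT A =====
-- the while-loop of A: appends 1 or 2 to res and halves N until N ≤ 1
def solveLoop (N : Int) (res : List Int) : List Int :=
  if h : N > 1 then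
    if PySem.Int.mod (PySem.Int.floordiv (N + 1) 2) 2 ≠ 0 then
      solveLoop (PySem.Int.floordiv (N + 1) 2) (res ++ [1])
    else
      solveLoop (PySem.Int.floordiv (N - 1) 2) (res ++ [2])
  else res
termination_by N.toNat
decreasing_by
  · rw [PySem.Int.floordiv_eq_ediv_of_pos (by norm_num)]; omega
  · rw [PySem.Int.floordiv_eq_ediv_of_pos (by norm_num)]; omega

def solve (N : Int) : Int × List Int :=
  if PySem.Int.mod N 2 = 0 then (-1, [])
  else
    let res := solveLoop N []
    ((res.length : Int), res.reverse)

-- ===== PORT B =====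
def solve_alt (N : Int) : Int × List Int :=
  if PySem.Int.mod N 2 = 0 then (-1, [])
  else if N ≤ 1 then (0, [])
  else
    let k : Nat := PySem.Int.bitLength N - 1
    let m : Int := PySem.Int.floordiv (N - 1) 2
    ((k : Int),
      (List.range k).map (fun i =>
        if PySem.Int.band (m >>> (k - 1 - i)) 1 ≠ 0 then (2 : Int) else 1))


-- ===== PRECONDITION & SPEC =====
def Spec_solve (N : Int) (out : Int × List Int) : Prop := out = solve_alt N
instance (N : Int) (out : Int × List Int) : Decidable (Spec_solve N out) := by unfold Spec_solve; infer_instance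

-- ===== CLAIM (what is proved, stated in full; the proofs are below) =====
def Claim_equal_solve : Prop := ∀ (N : Int), Dom_solve N → Spec_solve N (solve N)

-- ===== LEMMAS AND PROOFS =====

-- the digits A appends (LSB of (N-1)//2 first), proof-side only
def natDigits (m : Nat) : List Int :=
  if m = 0 then [] else (if m % 2 = 1 then 2 else 1) :: natDigits (m / 2)
decreasing_by exact Nat.div_lt_self (by omega) (by norm_num)

lemma natDigits_ne (m : Nat) (h : m ≠ 0) :
    natDigits m = (if m % 2 = 1 then 2 else 1) :: natDigits (m / 2) := by
  rw [natDigits, if_neg h]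

lemma solveLoop_eq (N : Int) (res : List Int) (hodd : PySem.Int.mod N 2 = 1) :
    solveLoop N res = res ++ natDigits ((PySem.Int.floordiv (N - 1) 2).toNat) := by
  rw [PySem.Int.mod_eq_emod_of_pos (by norm_num)] at hodd
  induction N, res using solveLoop.induct with
  | case1 N res h hcond IH =>
      simp only [PySem.Int.floordiv_eq_ediv_of_pos (show (0:Int) < 2 by norm_num),
        PySem.Int.mod_eq_emod_of_pos (show (0:Int) < 2 by norm_num)] at hcond
      rw [solveLoop, dif_pos h, if_pos (by
        simp only [PySem.Int.floordiv_eq_ediv_of_pos (show (0:Int) < 2 by norm_num),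
          PySem.Int.mod_eq_emod_of_pos (show (0:Int) < 2 by norm_num)]; omega),
        IH (by
        simp only [PySem.Int.floordiv_eq_ediv_of_pos (show (0:Int) < 2 by norm_num)]
        omega)]
      simp only [PySem.Int.floordiv_eq_ediv_of_pos (show (0:Int) < 2 by norm_num)]
      have h2 : (((N + 1) / 2 - 1) / 2).toNat = ((N - 1) / 2).toNat / 2 := by omega
      rw [natDigits_ne (((N - 1) / 2).toNat) (by omega), if_neg (by omega), h2,
        List.append_assoc]
      rfl
  | case2 N res h hcond IH =>
      simp only [PySem.Int.floordiv_eq_ediv_of_pos (show (0:Int) < 2 by norm_num),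
        PySem.Int.mod_eq_emod_of_pos (show (0:Int) < 2 by norm_num)] at hcond
      rw [solveLoop, dif_pos h, if_neg (by
        simp only [PySem.Int.floordiv_eq_ediv_of_pos (show (0:Int) < 2 by norm_num),
          PySem.Int.mod_eq_emod_of_pos (show (0:Int) < 2 by norm_num)]; omega),
        IH (by
        simp only [PySem.Int.floordiv_eq_ediv_of_pos (show (0:Int) < 2 by norm_num)]
        omega)]
      simp only [PySem.Int.floordiv_eq_ediv_of_pos (show (0:Int) < 2 by norm_num)]
      have h2 : (((N - 1) / 2 - 1) / 2).toNat = ((N - 1) / 2).toNat / 2 := by omega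
      rw [natDigits_ne (((N - 1) / 2).toNat) (by omega), if_pos (by omega), h2,
        List.append_assoc]
      rfl
  | case3 N res h =>
      rw [solveLoop, dif_neg h, PySem.Int.floordiv_eq_ediv_of_pos (by norm_num)]
      have h0 : ((N - 1) / 2).toNat = 0 := by omega
      rw [h0, natDigits]
      simp

lemma natDigits_length (m : Nat) : (natDigits m).length = PySem.Int.bitLength (m : Int) := by
  induction m using Nat.strong_induction_on with
  | _ m IH =>
    by_cases h0 : m = 0
    · subst h0; rw [natDigits]; simp [PySem.Int.bitLength_zero]
    · rw [natDigits_ne m h0, PySem.Int.bitLength_natCast (m := m) (by omega)]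
      simp [IH (m / 2) (Nat.div_lt_self (by omega) (by norm_num))]

def bitDigit (m : Nat) (j : Nat) : Int := if (m >>> j) &&& 1 ≠ 0 then 2 else 1

lemma natDigits_eq_map (m : Nat) :
    natDigits m = (List.range (natDigits m).length).map (bitDigit m) := by
  induction m using Nat.strong_induction_on with
  | _ m IH =>
    by_cases h0 : m = 0
    · subst h0; rw [natDigits]; simp
    · rw [natDigits_ne m h0]
      have IH' := IH (m / 2) (Nat.div_lt_self (by omega) (by norm_num))
      simp only [List.length_cons, List.range_succ_eq_map, List.map_cons, List.map_map]
      congr 1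
      · simp [bitDigit, Nat.and_one_is_mod]
      · rw [IH']
        simp only [List.length_map, List.length_range]
        apply List.map_congr_left
        intro j hj
        have hs : m >>> (j + 1) = (m / 2) >>> j := by
          rw [show j + 1 = 1 + j by omega, Nat.shiftRight_add, Nat.shiftRight_one]
        simp only [Function.comp, bitDigit, Nat.succ_eq_add_one, hs]

lemma reverse_map_range {α : Type} (f : Nat → α) (k : Nat) :
    ((List.range k).map f).reverse = (List.range k).map (fun i => f (k - 1 - i)) := by
  apply List.ext_getElem
  · simp
  · intro i h1 h2
    simp only [List.getElem_reverse, List.length_map, List.length_range, List.getElem_map,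
      List.getElem_range] at *

-- ===== VERDICT (by name: the statement is the Claim_ definition above) =====
theorem solve_spec : Claim_equal_solve := by
  intro N _
  unfold Spec_solve
  by_cases he : PySem.Int.mod N 2 = 0
  · rw [solve, solve_alt, if_pos he, if_pos he]
  · have hodd : PySem.Int.mod N 2 = 1 := by
      have := PySem.Int.mod_two_eq N
      tauto
    rw [solve, solve_alt, if_neg he, if_neg he]
    rw [solveLoop_eq N [] hodd]
    by_cases hle : N ≤ 1
    · rw [if_pos hle]
      have h0 : ((PySem.Int.floordiv (N - 1) 2).toNat) = 0 := by
        rw [PySem.Int.floordiv_eq_ediv_of_pos (by norm_num)]; omega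
      rw [h0, natDigits]
      simp
    · rw [if_neg hle]
      -- abbreviations
      set mn : Nat := (PySem.Int.floordiv (N - 1) 2).toNat with hmn
      have hmpos : 0 < mn := by
        rw [hmn, PySem.Int.floordiv_eq_ediv_of_pos (by norm_num)]
        have hodd' := hodd
        rw [PySem.Int.mod_eq_emod_of_pos (by norm_num)] at hodd'
        omega
      have hmcast : PySem.Int.floordiv (N - 1) 2 = (mn : Int) := by
        rw [hmn, PySem.Int.floordiv_eq_ediv_of_pos (by norm_num)]
        have hodd' := hodd
        rw [PySem.Int.mod_eq_emod_of_pos (by norm_num)] at hodd'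
        omega
      have hk : PySem.Int.bitLength N - 1 = (natDigits mn).length := by
        rw [natDigits_length, PySem.Int.bitLength_of_pos (by omega),
          show PySem.Int.floordiv N 2 = (mn : Int) by
            rw [PySem.Int.floordiv_eq_ediv_of_pos (by norm_num)]
            have hodd' := hodd
            rw [PySem.Int.mod_eq_emod_of_pos (by norm_num)] at hodd'
            rw [hmn, PySem.Int.floordiv_eq_ediv_of_pos (by norm_num)]
            omega]
        omega
      simp only [List.nil_append, hmcast, hk]
      refine Prod.ext ?_ ?_
      · simp
      · simp only
        rw [natDigits_eq_map mn, reverse_map_range]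
        simp only [List.length_map, List.length_range]
        apply List.map_congr_left
        intro j hj
        simp only [bitDigit]
        rw [show ((mn : Int) >>> ((natDigits mn).length - 1 - j)) = ((mn >>> ((natDigits mn).length - 1 - j) : Nat) : Int) from Int.natCast_shiftRight ..]
        rw [show (1 : Int) = ((1 : Nat) : Int) by norm_num, PySem.Int.band_natCast]
        simp only [ne_eq, Nat.cast_eq_zero]
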